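-- pv_equiv track=rewrite | github.com/ae9is/problems | src/121-best-time-to-buy-and-sell-stock/solution.py | max_pos_gradient
-- ===== SOURCE A (Python) =====
-- def max_pos_gradient(array: list[int]) -> int:
--   """
--   Get max single positive difference between values in array.
--   Positive defined as from low -> high value i.e. forward difference.
--   """
--   max = 0
--   for idx, a0 in enumerate(array):
--     for a1 in array[idx:]:
--       diff = a1 - a0
--       if diff > max:
--         max = diff
--   return max
-- ===== SOURCE B (Python) =====
-- def max_pos_gradient(array: list[int]) -> int:
--   """
--   Get max single positive difference between values in array.
--   Single pass: track the running minimum so far and the best forward gain.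
--   """
--   best = 0
--   mn = None
--   for x in array:
--     if mn is None or x < mn:
--       mn = x
--     elif x - mn > best:
--       best = x - mn
--   return best
-- ===== Notes on version B (the rewrite author's own statement) =====
-- stated objective: faster
-- what changed: Replaced the nested scan over all index pairs with a single left-to-right pass that tracks the running minimum and the best forward difference.
import Mathlib
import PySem

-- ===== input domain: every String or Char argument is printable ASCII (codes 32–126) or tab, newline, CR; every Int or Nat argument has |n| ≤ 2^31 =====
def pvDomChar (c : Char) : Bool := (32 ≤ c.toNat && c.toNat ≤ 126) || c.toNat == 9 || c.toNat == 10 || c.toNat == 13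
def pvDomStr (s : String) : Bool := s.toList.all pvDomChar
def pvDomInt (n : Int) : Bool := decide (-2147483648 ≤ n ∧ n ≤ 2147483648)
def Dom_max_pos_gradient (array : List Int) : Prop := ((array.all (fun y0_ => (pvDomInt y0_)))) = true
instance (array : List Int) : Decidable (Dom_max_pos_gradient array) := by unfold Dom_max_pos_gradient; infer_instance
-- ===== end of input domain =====

-- B replaces A's quadratic all-pairs scan by one pass tracking the running minimum; equal on all inputs.

-- ===== PORT A =====
-- literal port: for idx, a0 in enumerate(array): for a1 in array[idx:]: …
def max_pos_gradient (array : List Int) : Int :=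
  (PySem.List.enumerate array 0).foldl
    (fun m p =>
      (PySem.List.slice array (some p.1) none).foldl
        (fun m a1 => if a1 - p.2 > m then a1 - p.2 else m) m)
    0

-- ===== PORT B =====
-- literal port of Source B: state (mn : Option Int, best), one pass
def max_pos_gradient_alt (array : List Int) : Int :=
  (array.foldl
    (fun (st : Option Int × Int) x =>
      match st with
      | (none, b) => (some x, b)
      | (some m, b) =>
        if x < m then (some x, b)
        else if x - m > b then (some m, x - m) else (some m, b))
    (none, 0)).2

-- ===== PRECONDITION & SPEC =====
def Spec_max_pos_gradient (array : List Int) (out : Int) : Prop := out = max_pos_gradient_alt array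
instance (array : List Int) (out : Int) : Decidable (Spec_max_pos_gradient array out) := by unfold Spec_max_pos_gradient; infer_instance

-- ===== CLAIM (what is proved, stated in full; the proofs are below) =====
def Claim_equal_max_pos_gradient : Prop := ∀ (array : List Int), Dom_max_pos_gradient array → Spec_max_pos_gradient array (max_pos_gradient array)

-- ===== LEMMAS AND PROOFS =====

-- max forward gain from a fixed start value a over the tail t (0 counts: a pairs with itself)
def gmax (a : Int) : List Int → Int
  | [] => 0
  | x :: t => max (x - a) (gmax a t)

-- max forward gain over all pairs i ≤ j in l (0 if none positive)
def Dmax : List Int → Int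
  | [] => 0
  | a :: t => max (gmax a t) (Dmax t)

-- B's semantics: best gain over t with running minimum starting at m
def Fmin (m : Int) : List Int → Int
  | [] => 0
  | x :: t => if x < m then Fmin x t else max (x - m) (Fmin m t)

theorem gmax_nonneg (a : Int) (t : List Int) : 0 ≤ gmax a t := by
  induction t generalizing a with
  | nil => simp [gmax]
  | cons x t ih => simp only [gmax]; exact le_max_of_le_right (ih a)

theorem Dmax_nonneg (t : List Int) : 0 ≤ Dmax t := by
  cases t with
  | nil => simp [Dmax]
  | cons a t => exact le_max_of_le_left (gmax_nonneg a t)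

theorem gmax_mono {a b : Int} (h : a ≤ b) (t : List Int) : gmax b t ≤ gmax a t := by
  induction t with
  | nil => simp [gmax]
  | cons x t ih => simp only [gmax]; omega

-- A's inner fold with the if-max step, base ≥ 0
theorem foldl_gmax (a : Int) (t : List Int) : ∀ m : Int, 0 ≤ m →
    t.foldl (fun m a1 => if a1 - a > m then a1 - a else m) m
      = max m (gmax a t) := by
  induction t with
  | nil => intro m hm; simp [gmax]; omega
  | cons x t ih =>
    intro m hm
    simp only [List.foldl_cons, gmax]
    rw [show (if x - a > m then x - a else m) = max m (x - a) by omega]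
    rw [ih _ (le_max_of_le_left hm)]
    omega

-- A's outer fold over enumerate, generalized over the start index and accumulator
theorem outerA (arr : List Int) : ∀ (l : List Int) (k : Nat) (m : Int),
    arr.drop k = l → 0 ≤ m →
    (PySem.List.enumerate l (k : Int)).foldl
      (fun m p =>
        (PySem.List.slice arr (some p.1) none).foldl
          (fun m a1 => if a1 - p.2 > m then a1 - p.2 else m) m)
      m
      = max m (Dmax l) := by
  intro l
  induction l with
  | nil => intro k m _ hm; simp [PySem.List.enumerate, Dmax]; omega
  | cons a t ih =>
    intro k m hd hm
    rw [PySem.List.enumerate_cons, List.foldl_cons]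
    have hsl : PySem.List.slice arr (some (k : Int)) none = a :: t := by
      rw [PySem.List.slice_from_natCast]; exact hd
    simp only [hsl, List.foldl_cons]
    rw [show (if a - a > m then a - a else m) = m by omega]
    rw [foldl_gmax a t m hm]
    have hd' : arr.drop (k + 1) = t := by
      rw [← List.drop_drop, hd]; rfl
    have := ih (k + 1) (max m (gmax a t)) hd' (le_max_of_le_left hm)
    push_cast at this
    rw [this, Dmax]
    omega

-- B's fold once the minimum exists
theorem foldB (t : List Int) : ∀ (m b : Int), 0 ≤ b →
    (t.foldl
      (fun (st : Option Int × Int) x =>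
        match st with
        | (none, b) => (some x, b)
        | (some m, b) =>
          if x < m then (some x, b)
          else if x - m > b then (some m, x - m) else (some m, b))
      (some m, b)).2
      = max b (Fmin m t) := by
  induction t with
  | nil => intro m b hb; simp [Fmin]; omega
  | cons x t ih =>
    intro m b hb
    simp only [List.foldl_cons, Fmin]
    by_cases h : x < m
    · simp only [if_pos h]
      rw [ih x b hb]
    · simp only [if_neg h]
      rw [show (if x - m > b then ((some m : Option Int), x - m) else (some m, b))
            = (some m, max b (x - m)) by split_ifs <;> simp <;> omega]
      rw [ih m _ (by omega)]
      omega

-- the two semantics agree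
theorem Fmin_eq_Dmax (t : List Int) : ∀ a : Int, Fmin a t = max (gmax a t) (Dmax t) := by
  induction t with
  | nil => intro a; simp [Fmin, gmax, Dmax]
  | cons x t ih =>
    intro a
    simp only [Fmin, gmax, Dmax]
    by_cases h : x < a
    · simp only [if_pos h]
      rw [ih x]
      have h1 : gmax a t ≤ gmax x t := gmax_mono (le_of_lt h) t
      have h2 : 0 ≤ gmax x t := gmax_nonneg x t
      have h3 : 0 ≤ Dmax t := Dmax_nonneg t
      omega
    · simp only [if_neg h]
      rw [ih a]
      have h1 : gmax x t ≤ gmax a t := gmax_mono (by omega) t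
      have h2 : 0 ≤ gmax a t := gmax_nonneg a t
      have h3 : 0 ≤ Dmax t := Dmax_nonneg t
      omega

theorem A_eq_Dmax (arr : List Int) : max_pos_gradient arr = Dmax arr := by
  unfold max_pos_gradient
  have := outerA arr arr 0 0 rfl le_rfl
  simp only [Nat.cast_zero] at this
  rw [this]
  have := Dmax_nonneg arr
  omega

theorem B_eq_Dmax (arr : List Int) : max_pos_gradient_alt arr = Dmax arr := by
  unfold max_pos_gradient_alt
  cases arr with
  | nil => simp [Dmax]
  | cons a t =>
    simp only [List.foldl_cons]
    rw [foldB t a 0 le_rfl, Fmin_eq_Dmax t a, Dmax]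
    have := gmax_nonneg a t
    omega

-- ===== VERDICT (by name: the statement is the Claim_ definition above) =====
theorem max_pos_gradient_spec : Claim_equal_max_pos_gradient := by
  intro array _
  unfold Spec_max_pos_gradient
  rw [A_eq_Dmax, B_eq_Dmax]
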